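-- pv_equiv track=rewrite | github.com/injik0825-afk/doozon-converter | app/utils/visual_flags.py | top_flag
-- ===== SOURCE A (Python) =====
-- from enum import Enum
--
-- class Flag(str, Enum):
--     """
--     분개 라인 경고 플래그 (회사 무관)
--
--     우선순위(높→낮): UNHANDLED > MISSING_COST_BASIS > NEW_SECURITY > INFERRED_ACCOUNT
--     한 라인에 여러 플래그 가능, 화면에는 가장 높은 우선순위 색상 표시.
--     """
--     # 🔴 빨강 - 수동 검토 필수
--     UNHANDLED = 'UNHANDLED'                  # 분개 자동생성 실패한 라인 (placeholder)
--     BALANCE_MISMATCH = 'BALANCE_MISMATCH'    # 거래 단위 차/대변 불일치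
--
--     # 🟡 노랑 - 처분손익 계산 부정확 (취득가액 정보 부족)
--     MISSING_COST_BASIS = 'MISSING_COST_BASIS'  # 매도했는데 보유수량 0 또는 평균단가 0
--
--     # 🔵 파랑 - 신규 종목 (거래처 코드 미등록)
--     NEW_SECURITY = 'NEW_SECURITY'            # 이번 달 처음 등장한 종목
--
--     # 🟠 주황 - 추정/유추된 정보
--     INFERRED_ACCOUNT = 'INFERRED_ACCOUNT'    # 계정과목을 비고/적요로 유추함
--     INFERRED_PARTNER = 'INFERRED_PARTNER'    # 거래처를 추정함 (이체 상대 등)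
--
--     # ⚪ 회색 - 참고용
--     AUTO_GENERATED = 'AUTO_GENERATED'        # 월말평가 등 자동 생성 (오류 아님, 단순 표시)
--
-- PRIORITY = [
--     Flag.UNHANDLED,
--     Flag.BALANCE_MISMATCH,
--     Flag.MISSING_COST_BASIS,
--     Flag.NEW_SECURITY,
--     Flag.INFERRED_ACCOUNT,
--     Flag.INFERRED_PARTNER,
--     Flag.AUTO_GENERATED,
-- ]
--
-- def top_flag(flags) -> Flag | None:
--     """플래그 리스트에서 가장 우선순위 높은 플래그 반환"""
--     if not flags:
--         return None
--     flag_set = {f if isinstance(f, Flag) else Flag(f) for f in flags}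
--     for p in PRIORITY:
--         if p in flag_set:
--             return p
--     return None
-- ===== SOURCE B (Python) =====
-- from enum import Enum
--
--
-- class Flag(str, Enum):
--     UNHANDLED = 'UNHANDLED'
--     BALANCE_MISMATCH = 'BALANCE_MISMATCH'
--     MISSING_COST_BASIS = 'MISSING_COST_BASIS'
--     NEW_SECURITY = 'NEW_SECURITY'
--     INFERRED_ACCOUNT = 'INFERRED_ACCOUNT'
--     INFERRED_PARTNER = 'INFERRED_PARTNER'
--     AUTO_GENERATED = 'AUTO_GENERATED'
--
--
-- PRIORITY = [
--     Flag.UNHANDLED,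
--     Flag.BALANCE_MISMATCH,
--     Flag.MISSING_COST_BASIS,
--     Flag.NEW_SECURITY,
--     Flag.INFERRED_ACCOUNT,
--     Flag.INFERRED_PARTNER,
--     Flag.AUTO_GENERATED,
-- ]
--
-- _RANK = {flag: i for i, flag in enumerate(PRIORITY)}
--
--
-- def top_flag(flags):
--     """Return the highest-priority flag: one pass over the input, tracking the minimum rank."""
--     if not flags:
--         return None
--     best = None
--     best_rank = len(PRIORITY)
--     for f in flags:
--         g = f if isinstance(f, Flag) else Flag(f)
--         r = _RANK[g]
--         if r < best_rank:
--             best, best_rank = g, r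
--     return best
-- ===== Notes on version B (the rewrite author's own statement) =====
-- stated objective: idiomatic
-- what changed: B builds a flag->rank dict once and makes a single pass over the input tracking the minimum-rank flag, instead of A's building a set of the input and scanning the fixed PRIORITY list for the first member.
import Mathlib
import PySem

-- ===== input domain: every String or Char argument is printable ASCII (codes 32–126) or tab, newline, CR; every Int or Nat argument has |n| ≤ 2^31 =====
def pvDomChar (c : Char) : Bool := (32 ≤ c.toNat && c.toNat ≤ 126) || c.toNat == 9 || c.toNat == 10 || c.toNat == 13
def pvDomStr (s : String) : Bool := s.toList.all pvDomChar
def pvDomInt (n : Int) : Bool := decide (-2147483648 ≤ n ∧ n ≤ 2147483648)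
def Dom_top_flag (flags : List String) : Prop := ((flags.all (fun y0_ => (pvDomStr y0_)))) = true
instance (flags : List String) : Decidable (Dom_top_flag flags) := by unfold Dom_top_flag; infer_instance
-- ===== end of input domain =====

-- B differs from A only in algorithm shape; equivalence of return values is proved on Pre_ (all flags valid).

-- ===== PORT A =====
-- PRIORITY list of flag values (Flag values are their own strings)
def PRIORITY : List String :=
  ["UNHANDLED", "BALANCE_MISMATCH", "MISSING_COST_BASIS", "NEW_SECURITY",
   "INFERRED_ACCOUNT", "INFERRED_PARTNER", "AUTO_GENERATED"]

-- A: build set of the input flags, scan PRIORITY for the first member.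
-- Flag(f) raises ValueError on an invalid string; Pre_ excludes those inputs, so the
-- conversion is the identity here.
def top_flag (flags : List String) : Option String :=
  if flags = [] then none
  else
    let flagSet : PySem.Set String := PySem.Set.ofList flags
    PRIORITY.find? (fun p => PySem.Set.contains flagSet p)

-- ===== PORT B =====
-- _RANK = {flag: i for i, flag in enumerate(PRIORITY)}
def RANK : PySem.Dict String Int :=
  (PySem.List.enumerate PRIORITY).foldl (fun d p => d.insert p.2 p.1) PySem.Dict.empty

-- B: one pass over the input, tracking the flag of minimum rank.
-- (_RANK[g] never misses for a valid Flag g, so getD's default is unreachable on Pre_.)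
def top_flag_alt (flags : List String) : Option String :=
  if flags = [] then none
  else
    (flags.foldl
      (fun acc f =>
        let r := PySem.Dict.getD RANK f 7
        if r < acc.2 then (some f, r) else acc)
      ((none : Option String), (7 : Int))).1

-- ===== PRECONDITION & SPEC =====
-- Pre_ excludes inputs containing a string that is not a Flag value: there Python A
-- (and B) raise ValueError from Flag(f).
def Pre_top_flag (flags : List String) : Prop := ∀ f ∈ flags, f ∈ PRIORITY
instance (flags : List String) : Decidable (Pre_top_flag flags) := by unfold Pre_top_flag; infer_instance

def pvWitness_top_flag : List String := ["NEW_SECURITY", "MISSING_COST_BASIS"]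

def Spec_top_flag (flags : List String) (out : Option String) : Prop := out = top_flag_alt flags
instance (flags : List String) (out : Option String) : Decidable (Spec_top_flag flags out) := by unfold Spec_top_flag; infer_instance

-- ===== CLAIM (what is proved, stated in full; the proofs are below) =====
def Claim_equal_top_flag : Prop := ∀ (flags : List String), Dom_top_flag flags → Pre_top_flag flags → Spec_top_flag flags (top_flag flags)

-- ===== LEMMAS AND PROOFS =====

-- rank as B's port computes it
def rk (f : String) : Int := PySem.Dict.getD RANK f 7

-- the string-valued running minimum underlying B's fold
def mf (b : String) (l : List String) : String :=
  l.foldl (fun b f => if rk f < rk b then f else b) b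

lemma rk_lt_seven_of_mem {f : String} (h : f ∈ PRIORITY) : rk f < 7 := by
  simp only [PRIORITY, List.mem_cons, List.not_mem_nil, or_false] at h
  rcases h with h | h | h | h | h | h | h <;> subst h <;> decide

lemma foldB (l : List String) (b : String) :
    l.foldl
      (fun acc f =>
        let r := PySem.Dict.getD RANK f 7
        if r < acc.2 then (some f, r) else acc)
      (some b, PySem.Dict.getD RANK b 7)
    = (some (mf b l), PySem.Dict.getD RANK (mf b l) 7) := by
  induction l generalizing b with
  | nil => simp [mf]
  | cons f l ih =>
    simp only [List.foldl_cons, mf, rk]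
    by_cases h : PySem.Dict.getD RANK f 7 < PySem.Dict.getD RANK b 7
    · simpa [mf, rk, h] using ih f
    · simpa [mf, rk, h] using ih b

lemma mf_mem (b : String) (l : List String) : mf b l = b ∨ mf b l ∈ l := by
  induction l generalizing b with
  | nil => simp [mf]
  | cons f l ih =>
    simp only [mf, List.foldl_cons]
    by_cases h : rk f < rk b
    · rw [if_pos h]
      right
      rcases ih f with h' | h' <;> simp [mf] at h' <;> simp [h']
    · rw [if_neg h]
      rcases ih b with h' | h'
      · left; simpa [mf] using h'
      · right; simp [mf] at h'; simp [h']

lemma mf_min (b : String) (l : List String) :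
    rk (mf b l) ≤ rk b ∧ ∀ x ∈ l, rk (mf b l) ≤ rk x := by
  induction l generalizing b with
  | nil => simp [mf]
  | cons f l ih =>
    simp only [mf, List.foldl_cons, List.mem_cons]
    by_cases h : rk f < rk b
    · rw [if_pos h]
      obtain ⟨h1, h2⟩ := ih f
      refine ⟨le_of_lt (lt_of_le_of_lt h1 h), fun x hx => ?_⟩
      rcases hx with rfl | hx
      · exact h1
      · exact h2 x hx
    · rw [if_neg h]
      obtain ⟨h1, h2⟩ := ih b
      refine ⟨h1, fun x hx => ?_⟩
      rcases hx with rfl | hx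
      · exact le_trans h1 (not_lt.mp h)
      · exact h2 x hx

-- the first PRIORITY element occurring in flags is its minimum-rank member
lemma find_min (flags : List String) (m : String)
    (hm : m ∈ flags) (hmin : ∀ x ∈ flags, rk m ≤ rk x) (hP : m ∈ PRIORITY) :
    PRIORITY.find? (fun p => PySem.Set.contains (PySem.Set.ofList flags) p) = some m := by
  have no_lower : ∀ q : String, rk q < rk m → q ∉ flags := by
    intro q hq h
    exact absurd (hmin q h) (not_le.mpr hq)
  simp only [PRIORITY, List.mem_cons, List.not_mem_nil, or_false] at hP
  rcases hP with h | h | h | h | h | h | h <;> subst h <;>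
    simp only [PRIORITY, List.find?]
  · simp [hm]
  · simp [hm,
      no_lower "UNHANDLED" (by decide)]
  · simp [hm,
      no_lower "UNHANDLED" (by decide),
      no_lower "BALANCE_MISMATCH" (by decide)]
  · simp [hm,
      no_lower "UNHANDLED" (by decide),
      no_lower "BALANCE_MISMATCH" (by decide),
      no_lower "MISSING_COST_BASIS" (by decide)]
  · simp [hm,
      no_lower "UNHANDLED" (by decide),
      no_lower "BALANCE_MISMATCH" (by decide),
      no_lower "MISSING_COST_BASIS" (by decide),
      no_lower "NEW_SECURITY" (by decide)]
  · simp [hm,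
      no_lower "UNHANDLED" (by decide),
      no_lower "BALANCE_MISMATCH" (by decide),
      no_lower "MISSING_COST_BASIS" (by decide),
      no_lower "NEW_SECURITY" (by decide),
      no_lower "INFERRED_ACCOUNT" (by decide)]
  · simp [hm,
      no_lower "UNHANDLED" (by decide),
      no_lower "BALANCE_MISMATCH" (by decide),
      no_lower "MISSING_COST_BASIS" (by decide),
      no_lower "NEW_SECURITY" (by decide),
      no_lower "INFERRED_ACCOUNT" (by decide),
      no_lower "INFERRED_PARTNER" (by decide)]

-- ===== VERDICT (by name: the statement is the Claim_ definition above) =====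
theorem top_flag_spec : Claim_equal_top_flag := by
  intro flags _ hpre
  show top_flag flags = top_flag_alt flags
  cases flags with
  | nil => rfl
  | cons f rest =>
    have hf : f ∈ PRIORITY := hpre f (by simp)
    have hrest : ∀ x ∈ rest, x ∈ PRIORITY := fun x hx => hpre x (by simp [hx])
    unfold top_flag top_flag_alt
    simp only [if_neg (List.cons_ne_nil f rest), List.foldl_cons]
    have h7 : PySem.Dict.getD RANK f 7 < (7 : Int) := rk_lt_seven_of_mem hf
    rw [if_pos h7, foldB rest f]
    have hM : mf f rest ∈ PRIORITY := by
      rcases mf_mem f rest with h | h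
      · rw [h]; exact hf
      · exact hrest _ h
    have hMem : mf f rest ∈ f :: rest := by
      rcases mf_mem f rest with h | h <;> simp [h]
    obtain ⟨h1, h2⟩ := mf_min f rest
    have hMin : ∀ x ∈ f :: rest, rk (mf f rest) ≤ rk x := by
      intro x hx
      rcases List.mem_cons.mp hx with rfl | hx
      · exact h1
      · exact h2 x hx
    rw [find_min (f :: rest) (mf f rest) hMem hMin hM]
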